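-- pv_equiv track=rewrite | github.com/sybui2004/PythonPTIT | PY01050.py | check
-- ===== SOURCE A (Python) =====
-- def check(s):
--     cntA = 0
--     cntB = 0
--     cntC = 0
--     for i in s:
--         if i == "A":
--             cntA += 1
--         elif i == "B":
--             cntB += 1
--         else:
--             cntC += 1
--
--     return cntA > 0 and cntB > 0 and cntC > 0 and (cntA <= cntB) and (cntB <= cntC)
-- ===== SOURCE B (Python) =====
-- def check(s):
--     # Sort the classified characters (A < B < C-bucket) and read the counts off
--     # the boundary positions of the sorted list instead of counting.
--     t = sorted("A" if ch == "A" else "B" if ch == "B" else "C" for ch in s)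
--     if "B" not in t or "C" not in t or t[0] != "A":
--         return False
--     i = t.index("B")          # i = number of A's
--     j = t.index("C")          # j = number of A's + number of B's
--     return i <= j - i <= len(t) - j
-- ===== Notes on version B (the rewrite author's own statement) =====
-- stated objective: alternative
-- what changed: B sorts the characters classified into the three buckets (A < B < other-as-C) and reads the counts off boundary positions of the sorted list (first 'B', first 'C', length) instead of A's count-every-character loop.
import Mathlib
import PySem

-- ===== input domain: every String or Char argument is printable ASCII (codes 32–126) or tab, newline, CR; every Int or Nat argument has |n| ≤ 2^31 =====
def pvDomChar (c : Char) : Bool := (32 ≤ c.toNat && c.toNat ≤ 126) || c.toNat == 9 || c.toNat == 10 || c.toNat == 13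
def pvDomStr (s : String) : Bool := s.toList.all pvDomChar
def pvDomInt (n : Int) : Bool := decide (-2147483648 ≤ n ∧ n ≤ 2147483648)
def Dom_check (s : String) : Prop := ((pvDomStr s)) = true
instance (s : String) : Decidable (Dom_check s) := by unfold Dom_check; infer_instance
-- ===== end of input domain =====

-- B replaces A's counting loop by a sort of the classified characters and reads the
-- counts off boundary positions (first 'B', first 'C') of the sorted list (alternative algorithm; not faster).

-- ===== PORT A =====
def check (s : String) : Bool :=
  let st := s.toList.foldl (fun (t : Int × Int × Int) i =>
    if i == 'A' then (t.1 + 1, t.2.1, t.2.2)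
    else if i == 'B' then (t.1, t.2.1 + 1, t.2.2)
    else (t.1, t.2.1, t.2.2 + 1)) (0, 0, 0)
  decide (st.1 > 0) && decide (st.2.1 > 0) && decide (st.2.2 > 0) &&
    decide (st.1 ≤ st.2.1) && decide (st.2.1 ≤ st.2.2)

-- ===== PORT B =====
-- helper: the generator expression's classification of one character
def pvClassify (ch : Char) : Char := if ch == 'A' then 'A' else if ch == 'B' then 'B' else 'C'

def check_alt (s : String) : Bool :=
  let t := PySem.List.sorted (s.toList.map pvClassify) (fun x => x) false
  if ¬ ('B' ∈ t) ∨ ¬ ('C' ∈ t) ∨ PySem.List.pyGet? t 0 ≠ some 'A' then false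
  else
    match PySem.List.index? t 'B', PySem.List.index? t 'C' with
    | some i, some j =>
        decide ((i : Int) ≤ (j : Int) - (i : Int)) &&
        decide ((j : Int) - (i : Int) ≤ (t.length : Int) - (j : Int))
    | _, _ => false

-- ===== PRECONDITION & SPEC =====
def Spec_check (s : String) (out : Bool) : Prop := out = check_alt s
instance (s : String) (out : Bool) : Decidable (Spec_check s out) := by unfold Spec_check; infer_instance

-- ===== CLAIM (what is proved, stated in full; the proofs are below) =====
def Claim_equal_check : Prop := ∀ (s : String), Dom_check s → Spec_check s (check s)

-- ===== LEMMAS AND PROOFS =====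

theorem check_fold_eq (l : List Char) : ∀ (a0 b0 c0 : Int),
    l.foldl (fun (t : Int × Int × Int) i =>
      if i == 'A' then (t.1 + 1, t.2.1, t.2.2)
      else if i == 'B' then (t.1, t.2.1 + 1, t.2.2)
      else (t.1, t.2.1, t.2.2 + 1)) (a0, b0, c0)
    = (a0 + l.count 'A', b0 + l.count 'B',
       c0 + l.countP (fun ch => !(ch == 'A' || ch == 'B'))) := by
  induction l with
  | nil => intro a0 b0 c0; simp
  | cons x xs ih =>
    intro a0 b0 c0
    rw [List.foldl_cons]
    by_cases hA : x = 'A'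
    · subst hA
      rw [if_pos (show (('A':Char) == 'A') = true by decide), ih]
      simp only [Prod.mk.injEq, List.count_cons, List.countP_cons]
      refine ⟨?_, ?_, ?_⟩ <;> simp <;> push_cast <;> omega
    · by_cases hB : x = 'B'
      · subst hB
        rw [if_neg (show ¬ ((('B':Char) == 'A') = true) by decide),
            if_pos (show (('B':Char) == 'B') = true by decide), ih]
        simp only [Prod.mk.injEq, List.count_cons, List.countP_cons]
        refine ⟨?_, ?_, ?_⟩ <;> simp <;> push_cast <;> omega
      · rw [if_neg (by simp [hA]), if_neg (by simp [hB]), ih]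
        simp only [Prod.mk.injEq, List.count_cons, List.countP_cons]
        refine ⟨?_, ?_, ?_⟩ <;> simp [hA, hB] <;> push_cast <;> omega

theorem abc_length (cs : List Char) :
    cs.count 'A' + cs.count 'B' + cs.countP (fun ch => !(ch == 'A' || ch == 'B')) = cs.length := by
  induction cs with
  | nil => simp
  | cons x xs ih =>
    simp only [List.count_cons, List.countP_cons, List.length_cons]
    by_cases hA : x = 'A'
    · subst hA; simp [Bool.not_or] at ih ⊢; omega
    · by_cases hB : x = 'B'
      · subst hB; simp [Bool.not_or] at ih ⊢; omega
      · simp [Bool.not_or, hA, hB] at ih ⊢; omega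

-- the classified multiset, as a permutation of the canonical sorted block list
theorem map_classify_perm (cs : List Char) :
    (List.replicate (cs.count 'A') 'A' ++ List.replicate (cs.count 'B') 'B' ++
     List.replicate (cs.countP (fun ch => !(ch == 'A' || ch == 'B'))) 'C').Perm
    (cs.map pvClassify) := by
  induction cs with
  | nil => simp
  | cons x xs ih =>
    simp only [List.count_cons, List.countP_cons, List.map_cons]
    by_cases hA : x = 'A'
    · subst hA
      have hc : pvClassify 'A' = 'A' := by decide
      simp only [hc, show (('A':Char) == 'A') = true by decide,
        show (('A':Char) == 'B') = false by decide,
        show (!((('A':Char) == 'A') || (('A':Char) == 'B'))) = false by decide,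
        if_true, Bool.false_eq_true, if_false, List.replicate_succ]
      simpa [List.replicate_succ] using ih.cons 'A'
    · by_cases hB : x = 'B'
      · subst hB
        have hc : pvClassify 'B' = 'B' := by decide
        simp only [hc, show (('B':Char) == 'A') = false by decide,
          show (('B':Char) == 'B') = true by decide,
          show (!((('B':Char) == 'A') || (('B':Char) == 'B'))) = false by decide,
          if_true, Bool.false_eq_true, if_false, List.replicate_succ]
        refine List.Perm.trans ?_ (ih.cons 'B')
        have h := List.perm_middle (a := 'B') (l₁ := List.replicate (xs.count 'A') 'A')
          (l₂ := List.replicate (xs.count 'B') 'B' ++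
            List.replicate (xs.countP (fun ch => !(ch == 'A' || ch == 'B'))) 'C')
        simpa [List.append_assoc] using h
      · have hc : pvClassify x = 'C' := by simp [pvClassify, hA, hB]
        have h1 : (x == 'A') = false := by simp [hA]
        have h2 : (x == 'B') = false := by simp [hB]
        simp only [hc, h1, h2, Bool.or_self, Bool.not_false, if_true,
          Bool.false_eq_true, if_false, List.replicate_succ]
        refine List.Perm.trans ?_ (ih.cons 'C')
        have h := List.perm_middle (a := 'C')
          (l₁ := List.replicate (xs.count 'A') 'A' ++ List.replicate (xs.count 'B') 'B')
          (l₂ := List.replicate (xs.countP (fun ch => !(ch == 'A' || ch == 'B'))) 'C')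
        simpa [List.append_assoc] using h

theorem blocks_pairwise (a b c : Nat) :
    (List.replicate a 'A' ++ List.replicate b 'B' ++ List.replicate c 'C').Pairwise (· ≤ ·) := by
  refine List.pairwise_append.2 ⟨List.pairwise_append.2 ⟨?_, ?_, ?_⟩, ?_, ?_⟩
  · exact List.pairwise_replicate.2 (Or.inr le_rfl)
  · exact List.pairwise_replicate.2 (Or.inr le_rfl)
  · intro x hx y hy
    rw [List.eq_of_mem_replicate hx, List.eq_of_mem_replicate hy]; decide
  · exact List.pairwise_replicate.2 (Or.inr le_rfl)
  · intro x hx y hy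
    rw [List.eq_of_mem_replicate hy]
    rcases List.mem_append.1 hx with h | h <;> rw [List.eq_of_mem_replicate h] <;> decide

theorem sorted_classify (cs : List Char) :
    PySem.List.sorted (cs.map pvClassify) (fun x => x) false
      = List.replicate (cs.count 'A') 'A' ++ List.replicate (cs.count 'B') 'B' ++
        List.replicate (cs.countP (fun ch => !(ch == 'A' || ch == 'B'))) 'C' :=
  PySem.List.sorted_id_eq_of_perm_of_pairwise _ _ (map_classify_perm cs) (blocks_pairwise _ _ _)

theorem index?_blocks_B (a b c : Nat) (hb : 0 < b) :
    PySem.List.index? (List.replicate a 'A' ++ List.replicate b 'B' ++ List.replicate c 'C') 'B'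
      = some a := by
  rw [PySem.List.index?_eq_some_iff]
  refine ⟨List.replicate a 'A', List.replicate (b - 1) 'B' ++ List.replicate c 'C', ?_, by simp, ?_⟩
  · obtain ⟨b', rfl⟩ : ∃ b', b = b' + 1 := ⟨b - 1, by omega⟩
    simp [List.replicate_succ, List.append_assoc]
  · intro h; have := List.eq_of_mem_replicate h; exact absurd this (by decide)

theorem index?_blocks_C (a b c : Nat) (hc : 0 < c) :
    PySem.List.index? (List.replicate a 'A' ++ List.replicate b 'B' ++ List.replicate c 'C') 'C'
      = some (a + b) := by
  rw [PySem.List.index?_eq_some_iff]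
  refine ⟨List.replicate a 'A' ++ List.replicate b 'B', List.replicate (c - 1) 'C', ?_, by simp, ?_⟩
  · obtain ⟨c', rfl⟩ : ∃ c', c = c' + 1 := ⟨c - 1, by omega⟩
    simp [List.replicate_succ, List.append_assoc]
  · intro h
    rcases List.mem_append.1 h with h | h <;>
      exact absurd (List.eq_of_mem_replicate h) (by decide)

theorem mem_blocks_B (a b c : Nat) :
    ('B' ∈ List.replicate a 'A' ++ List.replicate b 'B' ++ List.replicate c 'C') ↔ 0 < b := by
  simp [List.mem_replicate, Nat.pos_iff_ne_zero]

theorem mem_blocks_C (a b c : Nat) :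
    ('C' ∈ List.replicate a 'A' ++ List.replicate b 'B' ++ List.replicate c 'C') ↔ 0 < c := by
  simp [List.mem_replicate, Nat.pos_iff_ne_zero]

-- ===== VERDICT (by name: the statement is the Claim_ definition above) =====
theorem check_spec : Claim_equal_check := by
  intro s _
  unfold Spec_check check check_alt
  rw [check_fold_eq, sorted_classify]
  have hlen := abc_length s.toList
  generalize hga : List.count 'A' s.toList = a at hlen ⊢
  generalize hgb : List.count 'B' s.toList = b at hlen ⊢
  generalize hgc : List.countP (fun ch => !(ch == 'A' || ch == 'B')) s.toList = c at hlen ⊢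
  simp only [zero_add]
  by_cases hbpos : 0 < b
  · by_cases hcpos : 0 < c
    · by_cases hapos : 0 < a
      · -- all three classes present: compare the two arithmetic conditions
        obtain ⟨a', rfl⟩ : ∃ a', a = a' + 1 := ⟨a - 1, by omega⟩
        rw [index?_blocks_B _ _ _ hbpos, index?_blocks_C _ _ _ hcpos]
        rw [if_neg]
        · simp only [List.length_append, List.length_replicate]
          have hbe : ∀ (x y : Bool), (x = y) ↔ (x = true ↔ y = true) := by decide
          rw [hbe]
          simp only [Bool.and_eq_true, decide_eq_true_eq]
          push_cast
          constructor <;> intro h <;> omega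
        · push_neg
          refine ⟨(mem_blocks_B _ _ _).2 hbpos, (mem_blocks_C _ _ _).2 hcpos, ?_⟩
          simp [List.replicate_succ, PySem.List.pyGet?_zero_cons]
      · -- no 'A': B takes the early False branch; A's a > 0 fails
        have ha0 : a = 0 := by omega
        subst ha0
        rw [if_pos]
        · simp
        · refine Or.inr (Or.inr ?_)
          obtain ⟨b', rfl⟩ : ∃ b', b = b' + 1 := ⟨b - 1, by omega⟩
          simp [List.replicate_succ, PySem.List.pyGet?_zero_cons]
    · -- no 'C'
      have hc0 : c = 0 := by omega
      subst hc0
      rw [if_pos (Or.inr (Or.inl (by rw [mem_blocks_C]; omega)))]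
      simp
  · -- no 'B'
    have hb0 : b = 0 := by omega
    subst hb0
    rw [if_pos (Or.inl (by rw [mem_blocks_B]; omega))]
    simp
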